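-- pv_equiv track=rewrite | github.com/jmoggridge/bioinfo-notebooks | BA11_H - Spectral dictionary count.py | Size_of_spectral_dictionary
-- ===== SOURCE A (Python) =====
-- def Size_of_spectral_dictionary(spectrum, min_s, max_s):
--
--     """ Recursive function to count all possible peptides
--     scoring between min -> max score (*note -> never let t<0 in path)"""
--
--
--     def Size(i,t):
--
--         # do not count if score dips below zero (silly but yeah)
--         if i < 0 or t < 0:
--             return 0
--
--         # recursion -> get sum of peptides leading to (i,t)
--         #  size(i,t) =  sum -> size(i-|aa|,t-s[i]) -> for all AAs
--
--         elif (i,t) not in size_memo.keys():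
--             size_memo[(i,t)] = sum(Size(i - aa, t - spectrum[i]) for aa in AAs)
--
--         return size_memo[(i,t)]
--
--     ## wrapper
--
--     # initialize size_memo: an (i*t) matrix as dictionary
--     # size: sum of peptides in spectral_dict
--     size_memo = {(0,0):1}
--     sizes = []
--     mass = len(spectrum)-1
--
--     # compute size(m,score) for all scores t in range(acceptable scores)
--     for t in range(min_s, max_s + 1):
--         sizes.append(Size(mass, t))
--     return sizes
--
-- AAs = [57, 71, 87, 97, 99, 101, 103, 113, 113, 114, 115,\
--        128, 128, 129, 131, 137, 147, 156, 163, 186]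
-- ===== SOURCE B (Python) =====
-- AAs = [57, 71, 87, 97, 99, 101, 103, 113, 113, 114, 115,
--        128, 128, 129, 131, 137, 147, 156, 163, 186]
--
--
-- def Size_of_spectral_dictionary(spectrum, min_s, max_s):
--     """Iterative forward ('push') dynamic programme: layer i holds a dict
--     score -> number of peptides reaching position i with that score; each
--     layer, once complete, pushes its counts forward by every amino-acid mass."""
--     mass = len(spectrum) - 1
--     layers = [dict() for _ in range(mass + 1)]
--     if mass >= 0:
--         layers[0][0] = 1
--     for i in range(mass + 1):
--         for t, c in list(layers[i].items()):
--             for aa in AAs: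
--                 j = i + aa
--                 if j <= mass:
--                     t2 = t + spectrum[j]
--                     if t2 >= 0:
--                         layers[j][t2] = layers[j].get(t2, 0) + c
--     final = layers[mass] if mass >= 0 else {}
--     return [final.get(t, 0) for t in range(min_s, max_s + 1)]
-- ===== Notes on version B (the rewrite author's own statement) =====
-- stated objective: alternative
-- what changed: Replaces A's memoized top-down recursion (per-query Size(i,t) threading a shared (i,t)->count memo dict) by an iterative bottom-up 'push' dynamic programme: one dict of reachable scores per spectrum position, each completed layer pushing its counts forward by every amino-acid mass, the answer read off the final layer.
import Mathlib
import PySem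

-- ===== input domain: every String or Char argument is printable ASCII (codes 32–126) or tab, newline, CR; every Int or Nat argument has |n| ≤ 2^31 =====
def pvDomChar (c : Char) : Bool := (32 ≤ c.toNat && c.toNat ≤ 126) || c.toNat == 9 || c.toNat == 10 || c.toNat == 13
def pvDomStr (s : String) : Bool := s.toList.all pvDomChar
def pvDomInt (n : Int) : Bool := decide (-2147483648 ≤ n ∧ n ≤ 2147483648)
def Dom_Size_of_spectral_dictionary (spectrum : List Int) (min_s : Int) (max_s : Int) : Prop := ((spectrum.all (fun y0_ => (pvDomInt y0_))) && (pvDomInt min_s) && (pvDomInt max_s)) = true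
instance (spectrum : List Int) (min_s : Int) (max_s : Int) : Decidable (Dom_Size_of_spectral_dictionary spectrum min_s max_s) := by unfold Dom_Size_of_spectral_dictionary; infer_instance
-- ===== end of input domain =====

-- B replaces A's memoized top-down recursion by an iterative forward ('push') layer DP
-- over dictionaries of reachable scores (objective: alternative decomposition).

-- ===== PORT A =====
def AAsL : List Int := [57, 71, 87, 97, 99, 101, 103, 113, 113, 114, 115, 128, 128, 129, 131, 137, 147, 156, 163, 186]

-- A's inner memoized 'Size', threading the memo dict through the recursion.
-- 'fuel' only makes the recursion structural: every recursive call decreases i by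
-- at least 57 while the top call supplies fuel = mass.toNat + 1 > i, so the fuel-0
-- branch can only be reached with i < 0, where it returns exactly what the
-- i-< 0 branch returns; it never alters the computed values.
def SizeA (spectrum : List Int) : Nat → Int → Int → PySem.Dict (Int × Int) Int → Int × PySem.Dict (Int × Int) Int
  | 0, _, _, memo => (0, memo)
  | fuel+1, i, t, memo =>
    if i < 0 ∨ t < 0 then (0, memo)
    else
      let memo' :=
        if (memo.get? (i, t)).isSome then memo
        else
          -- sum(Size(i - aa, t - spectrum[i]) for aa in AAs); spectrum[i] is always
          -- in range here (0 ≤ i ≤ len(spectrum)-1), so .getD 0 is only a totality guard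
          let p := AAsL.foldl (fun (p : Int × PySem.Dict (Int × Int) Int) aa =>
              let r := SizeA spectrum fuel (i - aa) (t - (PySem.List.pyGet? spectrum i).getD 0) p.2
              (p.1 + r.1, r.2)) (0, memo)
          p.2.insert (i, t) p.1
      (memo'.getD (i, t) 0, memo')   -- key (i,t) is present here; getD 0 is a totality guard

def Size_of_spectral_dictionary (spectrum : List Int) (min_s : Int) (max_s : Int) : List Int :=
  let mass : Int := (spectrum.length : Int) - 1
  let r := (PySem.List.pyRange min_s (max_s + 1) 1).foldl
      (fun (p : List Int × PySem.Dict (Int × Int) Int) t =>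
        let q := SizeA spectrum (mass.toNat + 1) mass t p.2
        (p.1 ++ [q.1], q.2)) ([], PySem.Dict.empty.insert (0, 0) 1)
  r.1

-- ===== PORT B =====
-- one inner-loop body of B: j = i + aa; if j <= mass: t2 = t + spectrum[j]; if t2 >= 0: layers[j][t2] += c
def pushAA (spectrum : List Int) (mass : Int) (i : Nat) (t c : Int)
    (layers : List (PySem.Dict Int Int)) (aa : Int) : List (PySem.Dict Int Int) :=
  let j := (i : Int) + aa
  if j ≤ mass then
    let t2 := t + (PySem.List.pyGet? spectrum j).getD 0   -- 0 ≤ j ≤ mass: index always in range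
    if 0 ≤ t2 then
      layers.modify j.toNat (fun d => d.insert t2 (d.getD t2 0 + c))
    else layers
  else layers

-- one outer-loop body of B: for t, c in list(layers[i].items()): for aa in AAs: …
def pushLayer (spectrum : List Int) (mass : Int) (layers : List (PySem.Dict Int Int)) (i : Nat) : List (PySem.Dict Int Int) :=
  ((layers[i]?.getD PySem.Dict.empty).items).foldl
    (fun ls tc => AAsL.foldl (fun ls2 aa => pushAA spectrum mass i tc.1 tc.2 ls2 aa) ls) layers

def Size_of_spectral_dictionary_alt (spectrum : List Int) (min_s : Int) (max_s : Int) : List Int :=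
  let mass : Int := (spectrum.length : Int) - 1
  let layers0 : List (PySem.Dict Int Int) := (List.range (mass + 1).toNat).map (fun _ => PySem.Dict.empty)
  let layers1 := if 0 ≤ mass then layers0.modify 0 (fun d => d.insert 0 1) else layers0
  let layersF := (List.range (mass + 1).toNat).foldl (pushLayer spectrum mass) layers1
  let final := if 0 ≤ mass then layersF[mass.toNat]?.getD PySem.Dict.empty else PySem.Dict.empty
  (PySem.List.pyRange min_s (max_s + 1) 1).map (fun t => final.getD t 0)

-- ===== PRECONDITION & SPEC =====
def Spec_Size_of_spectral_dictionary (spectrum : List Int) (min_s : Int) (max_s : Int) (out : List Int) : Prop := out = Size_of_spectral_dictionary_alt spectrum min_s max_s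
instance (spectrum : List Int) (min_s : Int) (max_s : Int) (out : List Int) : Decidable (Spec_Size_of_spectral_dictionary spectrum min_s max_s out) := by unfold Spec_Size_of_spectral_dictionary; infer_instance

-- ===== CLAIM (what is proved, stated in full; the proofs are below) =====
def Claim_equal_Size_of_spectral_dictionary : Prop := ∀ (spectrum : List Int) (min_s : Int) (max_s : Int), Dom_Size_of_spectral_dictionary spectrum min_s max_s → Spec_Size_of_spectral_dictionary spectrum min_s max_s (Size_of_spectral_dictionary spectrum min_s max_s)

-- ===== LEMMAS AND PROOFS =====

theorem AAs_pos : ∀ aa ∈ AAsL, 57 ≤ aa := by decide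

def spI (spectrum : List Int) (i : Int) : Int := (PySem.List.pyGet? spectrum i).getD 0

-- the common mathematical specification: the value A's memoized Size(i,t) computes
def S (spectrum : List Int) (i t : Int) : Int :=
  if i < 0 ∨ t < 0 then 0
  else if i = 0 ∧ t = 0 then 1
  else (AAsL.attach.map (fun aa => S spectrum (i - aa.1) (t - spI spectrum i))).sum
termination_by (i + 1).toNat
decreasing_by
  have h57 := AAs_pos aa.1 aa.2
  omega

theorem S_neg (spectrum : List Int) (i t : Int) (h : i < 0 ∨ t < 0) : S spectrum i t = 0 := by
  rw [S]; simp [h]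

-- == A-side: the memoized recursion computes S ==

def GoodMemo (spectrum : List Int) (m : PySem.Dict (Int × Int) Int) : Prop :=
  m.get? (0, 0) = some 1 ∧ ∀ p v, m.get? p = some v → v = S spectrum p.1 p.2

theorem sum_map_attach_AAs (f : Int → Int) :
    (AAsL.attach.map (fun aa => f aa.1)).sum = (AAsL.map f).sum := by
  rw [show (fun aa : {x // x ∈ AAsL} => f aa.1) = f ∘ Subtype.val from rfl,
    ← List.map_map, List.attach_map_subtype_val]

theorem S_zero_zero (spectrum : List Int) : S spectrum 0 0 = 1 := by
  rw [S]; norm_num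

-- the inner 'sum(Size(i - aa, t - spectrum[i]) for aa in AAs)' fold of SizeA
def foldA (spectrum : List Int) (fuel : Nat) (i t : Int) (l : List Int)
    (acc : Int) (m : PySem.Dict (Int × Int) Int) : Int × PySem.Dict (Int × Int) Int :=
  l.foldl (fun (p : Int × PySem.Dict (Int × Int) Int) aa =>
      let r := SizeA spectrum fuel (i - aa) (t - (PySem.List.pyGet? spectrum i).getD 0) p.2
      (p.1 + r.1, r.2)) (acc, m)

theorem foldA_cons (spectrum : List Int) (fuel : Nat) (i t : Int) (aa : Int) (l : List Int)
    (acc : Int) (m : PySem.Dict (Int × Int) Int) :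
    foldA spectrum fuel i t (aa :: l) acc m =
      foldA spectrum fuel i t l
        (acc + (SizeA spectrum fuel (i - aa) (t - (PySem.List.pyGet? spectrum i).getD 0) m).1)
        (SizeA spectrum fuel (i - aa) (t - (PySem.List.pyGet? spectrum i).getD 0) m).2 := rfl

theorem foldA_correct (spectrum : List Int) (fuel : Nat)
    (IH : ∀ (i t : Int) (m : PySem.Dict (Int × Int) Int), i < (fuel : Int) → GoodMemo spectrum m →
      (SizeA spectrum fuel i t m).1 = S spectrum i t ∧
      GoodMemo spectrum (SizeA spectrum fuel i t m).2)
    (i t : Int) (hfi : i < (fuel : Int) + 57) :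
    ∀ (l : List Int), (∀ aa ∈ l, 57 ≤ aa) →
      ∀ (acc : Int) (m : PySem.Dict (Int × Int) Int), GoodMemo spectrum m →
        (foldA spectrum fuel i t l acc m).1
          = acc + (l.map (fun aa => S spectrum (i - aa) (t - spI spectrum i))).sum ∧
        GoodMemo spectrum (foldA spectrum fuel i t l acc m).2 := by
  intro l
  induction l with
  | nil => intro _ acc m hg; simp [foldA, hg]
  | cons aa l ihl =>
    intro hall acc m hg
    have h57 : 57 ≤ aa := hall aa (by simp)
    have hia : i - aa < (fuel : Int) := by omega
    obtain ⟨hv, hg'⟩ := IH (i - aa) (t - (PySem.List.pyGet? spectrum i).getD 0) m hia hg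
    rw [foldA_cons]
    obtain ⟨h1, h2⟩ := ihl (fun x hx => hall x (by simp [hx]))
      (acc + (SizeA spectrum fuel (i - aa) (t - (PySem.List.pyGet? spectrum i).getD 0) m).1)
      (SizeA spectrum fuel (i - aa) (t - (PySem.List.pyGet? spectrum i).getD 0) m).2 hg'
    refine ⟨?_, h2⟩
    rw [h1, hv]
    simp [spI]
    ring

theorem SizeA_correct (spectrum : List Int) :
    ∀ (fuel : Nat) (i t : Int) (m : PySem.Dict (Int × Int) Int), i < (fuel : Int) → GoodMemo spectrum m →
      (SizeA spectrum fuel i t m).1 = S spectrum i t ∧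
      GoodMemo spectrum (SizeA spectrum fuel i t m).2 := by
  intro fuel
  induction fuel with
  | zero =>
    intro i t m hi hg
    have hneg : i < 0 := by exact_mod_cast hi
    simp [SizeA, S_neg spectrum i t (Or.inl hneg), hg]
  | succ fuel IH =>
    intro i t m hi hg
    by_cases h0 : i < 0 ∨ t < 0
    · simp [SizeA, h0, S_neg spectrum i t h0, hg]
    · push Not at h0
      by_cases hm : (m.get? (i, t)).isSome
      · obtain ⟨v, hv⟩ := Option.isSome_iff_exists.mp hm
        have hvS : v = S spectrum i t := hg.2 (i, t) v hv
        have : (SizeA spectrum (fuel + 1) i t m) = (m.getD (i, t) 0, m) := by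
          simp [SizeA, h0, hm]
        rw [this]
        refine ⟨?_, hg⟩
        rw [PySem.Dict.getD_eq_get?_getD, hv, Option.getD_some, hvS]
      · -- (i,t) not in the memo: the fold runs and the result is inserted
        have hne : (i, t) ≠ ((0 : Int), (0 : Int)) := by
          intro hq
          rw [hq, hg.1] at hm
          simp at hm
        have hfold := foldA_correct spectrum fuel IH i t (by omega) AAsL AAs_pos 0 m hg
        have hrun : SizeA spectrum (fuel + 1) i t m =
            (((foldA spectrum fuel i t AAsL 0 m).2.insert (i, t)
                (foldA spectrum fuel i t AAsL 0 m).1).getD (i, t) 0,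
             (foldA spectrum fuel i t AAsL 0 m).2.insert (i, t)
                (foldA spectrum fuel i t AAsL 0 m).1) := by
          simp only [SizeA, foldA]
          rw [if_neg (by omega), if_neg (by simpa using hm)]
        have hsum : (foldA spectrum fuel i t AAsL 0 m).1 = S spectrum i t := by
          rw [hfold.1, S]
          rw [if_neg (by omega), if_neg (by intro hq; exact hne (by simp [hq.1, hq.2]))]
          rw [sum_map_attach_AAs (fun aa => S spectrum (i - aa) (t - spI spectrum i))]
          ring
        rw [hrun]
        constructor
        · rw [PySem.Dict.getD_eq_get?_getD, PySem.Dict.get?_insert_self, Option.getD_some, hsum]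
        · constructor
          · rw [PySem.Dict.get?_insert, if_neg (Ne.symm hne)]
            exact (hfold.2).1
          · intro p v hpv
            rw [PySem.Dict.get?_insert] at hpv
            by_cases hp : p = (i, t)
            · rw [if_pos hp] at hpv
              cases hpv
              rw [hp, hsum]
            · rw [if_neg hp] at hpv
              exact (hfold.2).2 p v hpv

theorem A_loop (spectrum : List Int) (mass : Int) (fuel : Nat) (hm : mass < (fuel : Int)) :
    ∀ (ts : List Int) (acc : List Int) (m : PySem.Dict (Int × Int) Int), GoodMemo spectrum m →
      (ts.foldl (fun (p : List Int × PySem.Dict (Int × Int) Int) t =>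
          let q := SizeA spectrum fuel mass t p.2
          (p.1 ++ [q.1], q.2)) (acc, m)).1
        = acc ++ ts.map (fun t => S spectrum mass t) := by
  intro ts
  induction ts with
  | nil => intro acc m _; simp
  | cons t ts ih =>
    intro acc m hg
    obtain ⟨h1, h2⟩ := SizeA_correct spectrum fuel mass t m hm hg
    simp only [List.foldl_cons, List.map_cons]
    rw [ih (acc ++ [(SizeA spectrum fuel mass t m).1]) (SizeA spectrum fuel mass t m).2 h2, h1]
    simp

theorem A_eq_map (spectrum : List Int) (min_s max_s : Int) :
    Size_of_spectral_dictionary spectrum min_s max_s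
      = (PySem.List.pyRange min_s (max_s + 1) 1).map
          (fun t => S spectrum ((spectrum.length : Int) - 1) t) := by
  have hg : GoodMemo spectrum (PySem.Dict.empty.insert ((0 : Int), (0 : Int)) 1) := by
    constructor
    · exact PySem.Dict.get?_insert_self _ _ _
    · intro p v hpv
      rw [PySem.Dict.get?_insert] at hpv
      by_cases hp : p = ((0 : Int), (0 : Int))
      · rw [if_pos hp] at hpv
        cases hpv
        rw [hp]
        exact (S_zero_zero spectrum).symm
      · rw [if_neg hp] at hpv
        simp [PySem.Dict.get?_empty] at hpv
  unfold Size_of_spectral_dictionary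
  simp only []
  rw [A_loop spectrum ((spectrum.length : Int) - 1) (((spectrum.length : Int) - 1).toNat + 1)
    (by omega) _ [] _ hg]
  simp


-- == B-side: the push DP computes S ==

theorem S_layer (spectrum : List Int) (k : Nat) (t : Int) :
    S spectrum (k : Int) t =
      (if k = 0 ∧ t = 0 then (1 : Int) else 0) +
      (AAsL.map (fun aa => if 0 ≤ (k : Int) - aa ∧ 0 ≤ t then
          S spectrum ((k : Int) - aa) (t - spI spectrum (k : Int)) else 0)).sum := by
  by_cases ht : t < 0
  · rw [S_neg spectrum _ t (Or.inr ht), if_neg (fun h => absurd h.2 (by omega))]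
    rw [List.sum_eq_zero (by
      intro x hx
      simp only [List.mem_map] at hx
      obtain ⟨aa, _, rfl⟩ := hx
      rw [if_neg (fun h => absurd h.2 (by omega))])]
    ring
  · rw [S]
    rw [if_neg (by omega)]
    by_cases hk0 : (k : Int) = 0 ∧ t = 0
    · rw [if_pos hk0, if_pos ⟨by exact_mod_cast hk0.1, hk0.2⟩]
      rw [List.sum_eq_zero (by
        intro x hx
        simp only [List.mem_map] at hx
        obtain ⟨aa, haa, rfl⟩ := hx
        have := AAs_pos aa haa
        rw [if_neg (fun h => by omega)])]
      ring
    · rw [if_neg hk0, if_neg (fun h => hk0 ⟨by exact_mod_cast h.1, h.2⟩)]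
      rw [sum_map_attach_AAs (fun aa => S spectrum ((k : Int) - aa) (t - spI spectrum (k : Int)))]
      rw [zero_add]
      apply congrArg List.sum
      apply List.map_congr_left
      intro aa haa
      by_cases hcase : 0 ≤ (k : Int) - aa
      · rw [if_pos ⟨hcase, by omega⟩]
      · rw [if_neg (fun h => hcase h.1), S_neg _ _ _ (Or.inl (by omega))]

def layerD (L : List (PySem.Dict Int Int)) (j : Nat) : PySem.Dict Int Int :=
  L[j]?.getD PySem.Dict.empty

def termB (spectrum : List Int) (k j : Nat) (t aa : Int) : Int :=
  if 0 ≤ (j : Int) - aa ∧ (j : Int) - aa < (k : Int) ∧ 0 ≤ t then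
    S spectrum ((j : Int) - aa) (t - spI spectrum (j : Int)) else 0

def InvB (spectrum : List Int) (k : Nat) (L : List (PySem.Dict Int Int)) : Prop :=
  L.length = spectrum.length ∧
  (∀ j : Nat, (layerD L j).keys.Nodup) ∧
  (∀ j : Nat, j < L.length → ∀ t : Int,
    (layerD L j).getD t 0 = (if j = 0 ∧ t = 0 then 1 else 0) + (AAsL.map (termB spectrum k j t)).sum)

theorem layer_read (spectrum : List Int) (n j : Nat) (L : List (PySem.Dict Int Int))
    (hInv : InvB spectrum n L) (hj : j < L.length) (hjn : j ≤ n) (t : Int) :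
    (layerD L j).getD t 0 = S spectrum (j : Int) t := by
  rw [hInv.2.2 j hj t, S_layer]
  congr 1
  apply congrArg List.sum
  apply List.map_congr_left
  intro aa haa
  have h57 := AAs_pos aa haa
  unfold termB
  by_cases hc : 0 ≤ (j : Int) - aa ∧ 0 ≤ t
  · rw [if_pos ⟨hc.1, by omega, hc.2⟩, if_pos hc]
  · rw [if_neg (fun h => hc ⟨h.1, h.2.2⟩), if_neg hc]

theorem layerD_modify_cases (ls : List (PySem.Dict Int Int)) (n : Nat)
    (f : PySem.Dict Int Int → PySem.Dict Int Int) (j : Nat) :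
    layerD (ls.modify n f) j = layerD ls j ∨ layerD (ls.modify n f) j = f (layerD ls j) := by
  unfold layerD
  rw [List.getElem?_modify]
  cases h : ls[j]? with
  | none => left; rfl
  | some d =>
    by_cases hn : n = j
    · right; simp [hn]
    · left; simp [hn]

theorem layerD_modify_eq (ls : List (PySem.Dict Int Int)) (n : Nat)
    (f : PySem.Dict Int Int → PySem.Dict Int Int) (j : Nat) (hj : j < ls.length) :
    layerD (ls.modify n f) j = if n = j then f (layerD ls j) else layerD ls j := by
  unfold layerD
  rw [List.getElem?_modify, List.getElem?_eq_getElem hj]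
  by_cases hn : n = j <;> simp [hn]

theorem length_pushAA (spectrum : List Int) (mass : Int) (k : Nat) (t' c aa : Int)
    (ls : List (PySem.Dict Int Int)) :
    (pushAA spectrum mass k t' c ls aa).length = ls.length := by
  simp only [pushAA]
  split_ifs <;> simp [List.length_modify]

theorem nodup_pushAA (spectrum : List Int) (mass : Int) (k : Nat) (t' c aa : Int)
    (ls : List (PySem.Dict Int Int)) (hnd : ∀ j, (layerD ls j).keys.Nodup) :
    ∀ j, (layerD (pushAA spectrum mass k t' c ls aa) j).keys.Nodup := by
  intro j
  simp only [pushAA]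
  split_ifs with h1 h2
  · cases layerD_modify_cases ls (((k : Int) + aa).toNat)
      (fun d => d.insert (t' + (PySem.List.pyGet? spectrum ((k : Int) + aa)).getD 0)
        (d.getD (t' + (PySem.List.pyGet? spectrum ((k : Int) + aa)).getD 0) 0 + c)) j with
    | inl h => rw [h]; exact hnd j
    | inr h => rw [h]; exact PySem.Dict.nodup_keys_insert _ _ _ (hnd j)
  · exact hnd j
  · exact hnd j

theorem getD_layerD_pushAA (spectrum : List Int) (mass : Int) (k : Nat) (t' c aa : Int)
    (ls : List (PySem.Dict Int Int)) (hm : mass = (ls.length : Int) - 1) (h57 : 57 ≤ aa)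
    (j : Nat) (hj : j < ls.length) (t : Int) :
    (layerD (pushAA spectrum mass k t' c ls aa) j).getD t 0
      = (layerD ls j).getD t 0 +
        (if (j : Int) = (k : Int) + aa ∧ t = t' + spI spectrum ((k : Int) + aa) ∧ 0 ≤ t then c
         else 0) := by
  simp only [pushAA, spI]
  by_cases h1 : (k : Int) + aa ≤ mass
  · rw [if_pos h1]
    by_cases h2 : 0 ≤ t' + (PySem.List.pyGet? spectrum ((k : Int) + aa)).getD 0
    · rw [if_pos h2]
      rw [layerD_modify_eq _ _ _ j hj]
      by_cases hn : ((k : Int) + aa).toNat = j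
      · have hja : (j : Int) = (k : Int) + aa := by omega
        rw [if_pos hn, PySem.Dict.getD_insert]
        by_cases hteq : t = t' + (PySem.List.pyGet? spectrum ((k : Int) + aa)).getD 0
        · rw [if_pos hteq, if_pos ⟨hja, hteq, by omega⟩, hteq]
        · rw [if_neg hteq, if_neg (fun h => hteq h.2.1)]
          ring
      · rw [if_neg hn, if_neg (fun h => hn (by omega))]
        ring
    · rw [if_neg h2, if_neg (fun h => h2 (by rw [← h.2.1]; exact h.2.2))]
      ring
  · rw [if_neg h1, if_neg (fun h => h1 (by omega))]
    ring

theorem pushAAs_props (spectrum : List Int) (mass : Int) (k : Nat) (t' c : Int) :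
    ∀ (l : List Int), (∀ aa ∈ l, 57 ≤ aa) →
      ∀ (ls : List (PySem.Dict Int Int)), mass = (ls.length : Int) - 1 →
        (∀ j, (layerD ls j).keys.Nodup) →
        (l.foldl (fun ls2 aa => pushAA spectrum mass k t' c ls2 aa) ls).length = ls.length ∧
        (∀ j, (layerD (l.foldl (fun ls2 aa => pushAA spectrum mass k t' c ls2 aa) ls) j).keys.Nodup) ∧
        (∀ (j : Nat), j < ls.length → ∀ t : Int,
          (layerD (l.foldl (fun ls2 aa => pushAA spectrum mass k t' c ls2 aa) ls) j).getD t 0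
            = (layerD ls j).getD t 0 +
              (l.map (fun aa => if (j : Int) = (k : Int) + aa ∧ t = t' + spI spectrum ((k : Int) + aa) ∧ 0 ≤ t then c else 0)).sum) := by
  intro l
  induction l with
  | nil => intro _ ls _ hnd; exact ⟨rfl, hnd, by intro j _ t; simp⟩
  | cons aa l ih =>
    intro hall ls hm hnd
    have h57 : 57 ≤ aa := hall aa (by simp)
    have hlen := length_pushAA spectrum mass k t' c aa ls
    have hnd' := nodup_pushAA spectrum mass k t' c aa ls hnd
    obtain ⟨ih1, ih2, ih3⟩ := ih (fun x hx => hall x (by simp [hx]))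
      (pushAA spectrum mass k t' c ls aa) (by rw [hlen]; exact hm) hnd'
    refine ⟨by rw [List.foldl_cons, ih1, hlen], by rw [List.foldl_cons]; exact ih2, ?_⟩
    intro j hj t
    rw [List.foldl_cons, ih3 j (by rw [hlen]; exact hj) t,
      getD_layerD_pushAA spectrum mass k t' c aa ls hm h57 j hj t]
    simp only [List.map_cons, List.sum_cons]
    ring

theorem pushItems_props (spectrum : List Int) (mass : Int) (k : Nat) :
    ∀ (its : List (Int × Int)) (ls : List (PySem.Dict Int Int)), mass = (ls.length : Int) - 1 →
      (∀ j, (layerD ls j).keys.Nodup) →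
      (its.foldl (fun ls tc => AAsL.foldl (fun ls2 aa => pushAA spectrum mass k tc.1 tc.2 ls2 aa) ls) ls).length = ls.length ∧
      (∀ j, (layerD (its.foldl (fun ls tc => AAsL.foldl (fun ls2 aa => pushAA spectrum mass k tc.1 tc.2 ls2 aa) ls) ls) j).keys.Nodup) ∧
      (∀ (j : Nat), j < ls.length → ∀ t : Int,
        (layerD (its.foldl (fun ls tc => AAsL.foldl (fun ls2 aa => pushAA spectrum mass k tc.1 tc.2 ls2 aa) ls) ls) j).getD t 0
          = (layerD ls j).getD t 0 +
            (its.map (fun tc => (AAsL.map (fun aa =>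
                if (j : Int) = (k : Int) + aa ∧ t = tc.1 + spI spectrum ((k : Int) + aa) ∧ 0 ≤ t then tc.2 else 0)).sum)).sum) := by
  intro its
  induction its with
  | nil => intro ls _ hnd; exact ⟨rfl, hnd, by intro j _ t; simp⟩
  | cons tc its ih =>
    intro ls hm hnd
    obtain ⟨h1, h2, h3⟩ := pushAAs_props spectrum mass k tc.1 tc.2 AAsL AAs_pos ls hm hnd
    obtain ⟨ih1, ih2, ih3⟩ := ih (AAsL.foldl (fun ls2 aa => pushAA spectrum mass k tc.1 tc.2 ls2 aa) ls)
      (by rw [h1]; exact hm) h2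
    refine ⟨by rw [List.foldl_cons, ih1, h1], by rw [List.foldl_cons]; exact ih2, ?_⟩
    intro j hj t
    rw [List.foldl_cons, ih3 j (by rw [h1]; exact hj) t, h3 j hj t]
    simp only [List.map_cons, List.sum_cons]
    ring

theorem sum_ite_key (ks : List Int) (f : Int → Int) (x : Int) (hnd : ks.Nodup) :
    (ks.map (fun k => if k = x then f k else 0)).sum = if x ∈ ks then f x else 0 := by
  induction ks with
  | nil => simp
  | cons a l ih =>
    rw [List.nodup_cons] at hnd
    simp only [List.map_cons, List.sum_cons, ih hnd.2]
    by_cases hax : a = x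
    · subst hax
      rw [if_pos rfl, if_neg hnd.1, if_pos (by simp)]
      ring
    · rw [if_neg hax, zero_add]
      by_cases hxl : x ∈ l
      · rw [if_pos hxl, if_pos (List.mem_cons_of_mem a hxl)]
      · rw [if_neg hxl, if_neg (fun h => (List.mem_cons.mp h).elim (fun h' => hax h'.symm) hxl)]

theorem dict_sum_ite (d : PySem.Dict Int Int) (hnd : d.keys.Nodup) (x : Int) :
    (d.items.map (fun tc => if tc.1 = x then tc.2 else 0)).sum = d.getD x 0 := by
  rw [PySem.Dict.items_eq_map_keys d hnd 0, List.map_map]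
  rw [show ((fun tc : Int × Int => if tc.1 = x then tc.2 else 0) ∘ fun k => (k, d.getD k 0))
      = fun k => if k = x then d.getD k 0 else 0 from rfl]
  rw [sum_ite_key d.keys _ x hnd]
  by_cases hx : x ∈ d.keys
  · rw [if_pos hx]
  · rw [if_neg hx]
    refine (PySem.Dict.getD_of_not_contains d 0 ?_).symm
    rw [PySem.Dict.contains_eq_decide_mem_keys]
    simp [hx]

theorem sum_exchange {α β : Type} (l1 : List α) (l2 : List β) (g : α → β → Int) :
    (l1.map (fun a => (l2.map (g a)).sum)).sum
      = (l2.map (fun b => (l1.map (fun a => g a b)).sum)).sum := by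
  induction l1 with
  | nil =>
    simp only [List.map_nil, List.sum_nil]
    exact (List.sum_eq_zero (by simp)).symm
  | cons a l ih =>
    simp only [List.map_cons, List.sum_cons, ih]
    rw [← PySem.List.sum_map_add_int l2 (fun b => g a b) (fun b => (l.map (fun a => g a b)).sum)]

theorem termB_succ (spectrum : List Int) (k j : Nat) (t aa : Int) :
    termB spectrum (k + 1) j t aa
      = termB spectrum k j t aa +
        (if (j : Int) = (k : Int) + aa ∧ 0 ≤ t then S spectrum (k : Int) (t - spI spectrum (j : Int)) else 0) := by
  unfold termB
  push_cast
  by_cases hnew : (j : Int) = (k : Int) + aa ∧ 0 ≤ t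
  · rw [if_pos hnew, if_pos (by omega), if_neg (by omega),
      show (j : Int) - aa = (k : Int) by omega]
    ring
  · rw [if_neg hnew]
    by_cases hold : 0 ≤ (j : Int) - aa ∧ (j : Int) - aa < (k : Int) ∧ 0 ≤ t
    · rw [if_pos hold, if_pos ⟨hold.1, by omega, hold.2.2⟩]
      ring
    · rw [if_neg hold, if_neg (fun h => by
        have hja : ¬ ((j : Int) = (k : Int) + aa) := fun he => hnew ⟨he, h.2.2⟩
        exact hold ⟨h.1, by omega, h.2.2⟩)]
      ring

theorem pushLayer_step (spectrum : List Int) (mass : Int) (k : Nat) (L : List (PySem.Dict Int Int))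
    (hm : mass = (spectrum.length : Int) - 1) (hInv : InvB spectrum k L) (hk : k < L.length) :
    InvB spectrum (k + 1) (pushLayer spectrum mass L k) := by
  obtain ⟨hlen, hnd, hform⟩ := hInv
  have hm' : mass = (L.length : Int) - 1 := by rw [hlen]; exact hm
  have hfin : ∀ t, (layerD L k).getD t 0 = S spectrum (k : Int) t :=
    layer_read spectrum k k L ⟨hlen, hnd, hform⟩ hk le_rfl
  obtain ⟨h1, h2, h3⟩ := pushItems_props spectrum mass k (layerD L k).items L hm' hnd
  have hpl : pushLayer spectrum mass L k
      = (layerD L k).items.foldl (fun ls tc => AAsL.foldl (fun ls2 aa => pushAA spectrum mass k tc.1 tc.2 ls2 aa) ls) L := rfl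
  refine ⟨by rw [hpl, h1]; exact hlen, by rw [hpl]; exact h2, ?_⟩
  intro j hj t
  have hj' : j < L.length := by rw [hpl, h1] at hj; exact hj
  rw [hpl, h3 j hj' t, hform j hj' t]
  -- exchange the double sum and evaluate the inner one per amino acid
  rw [sum_exchange ((layerD L k).items) AAsL
      (fun tc aa => if (j : Int) = (k : Int) + aa ∧ t = tc.1 + spI spectrum ((k : Int) + aa) ∧ 0 ≤ t then tc.2 else 0)]
  have hinner : ∀ aa ∈ AAsL,
      ((layerD L k).items.map (fun tc =>
          if (j : Int) = (k : Int) + aa ∧ t = tc.1 + spI spectrum ((k : Int) + aa) ∧ 0 ≤ t then tc.2 else 0)).sum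
        = (if (j : Int) = (k : Int) + aa ∧ 0 ≤ t then S spectrum (k : Int) (t - spI spectrum (j : Int)) else 0) := by
    intro aa haa
    by_cases houter : (j : Int) = (k : Int) + aa ∧ 0 ≤ t
    · rw [if_pos houter]
      have hsp : spI spectrum ((k : Int) + aa) = spI spectrum (j : Int) := by rw [houter.1]
      have hmc : ∀ tc ∈ (layerD L k).items,
          (if (j : Int) = (k : Int) + aa ∧ t = tc.1 + spI spectrum ((k : Int) + aa) ∧ 0 ≤ t then tc.2 else 0)
            = (if tc.1 = t - spI spectrum ((k : Int) + aa) then tc.2 else 0) := by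
        intro tc _
        by_cases hc : tc.1 = t - spI spectrum ((k : Int) + aa)
        · rw [if_pos hc, if_pos ⟨houter.1, by omega, houter.2⟩]
        · rw [if_neg hc, if_neg (fun h => hc (by omega))]
      rw [List.map_congr_left hmc,
        dict_sum_ite (layerD L k) (hnd k) (t - spI spectrum ((k : Int) + aa)), hfin, hsp]
    · rw [if_neg houter]
      apply List.sum_eq_zero
      intro x hx
      simp only [List.mem_map] at hx
      obtain ⟨tc, _, rfl⟩ := hx
      rw [if_neg (fun h => houter ⟨h.1, h.2.2⟩)]
  rw [List.map_congr_left hinner]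
  rw [List.map_congr_left (fun aa _ => termB_succ spectrum k j t aa),
    PySem.List.sum_map_add_int]
  ring

theorem layerD_oob (L : List (PySem.Dict Int Int)) (j : Nat) (hj : L.length ≤ j) :
    layerD L j = PySem.Dict.empty := by
  unfold layerD
  rw [List.getElem?_eq_none hj]
  rfl

theorem layerD_init (n : Nat) (j : Nat) :
    layerD ((List.range n).map (fun _ => PySem.Dict.empty)) j = PySem.Dict.empty := by
  unfold layerD
  rw [List.getElem?_map]
  cases h : (List.range n)[j]? <;> simp

theorem termB_zero_sum (spectrum : List Int) (j : Nat) (t : Int) :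
    (AAsL.map (termB spectrum 0 j t)).sum = 0 := by
  apply List.sum_eq_zero
  intro x hx
  simp only [List.mem_map] at hx
  obtain ⟨aa, _, rfl⟩ := hx
  unfold termB
  rw [if_neg (fun h => by omega)]

theorem InvB_zero (spectrum : List Int) :
    InvB spectrum 0
      (((List.range spectrum.length).map (fun _ => (PySem.Dict.empty : PySem.Dict Int Int))).modify 0
        (fun d => d.insert 0 1)) := by
  have hlen : (((List.range spectrum.length).map (fun _ => (PySem.Dict.empty : PySem.Dict Int Int))).modify 0
      (fun d => d.insert 0 1)).length = spectrum.length := by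
    simp [List.length_modify]
  have hbase : ∀ j : Nat, j < spectrum.length →
      layerD (((List.range spectrum.length).map (fun _ => (PySem.Dict.empty : PySem.Dict Int Int))).modify 0
        (fun d => d.insert 0 1)) j
      = if 0 = j then PySem.Dict.empty.insert 0 1 else PySem.Dict.empty := by
    intro j hj
    rw [layerD_modify_eq _ _ _ j (by simpa using hj), layerD_init]
  refine ⟨hlen, ?_, ?_⟩
  · intro j
    by_cases hj : j < spectrum.length
    · rw [hbase j hj]
      by_cases h0 : 0 = j
      · rw [if_pos h0]
        exact PySem.Dict.nodup_keys_insert _ _ _ PySem.Dict.nodup_keys_empty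
      · rw [if_neg h0]
        exact PySem.Dict.nodup_keys_empty
    · rw [layerD_oob _ j (by omega)]
      exact PySem.Dict.nodup_keys_empty
  · intro j hj t
    rw [hlen] at hj
    rw [hbase j hj, termB_zero_sum]
    by_cases h0 : 0 = j
    · rw [if_pos h0, PySem.Dict.getD_insert]
      by_cases ht : t = 0
      · rw [if_pos ht, if_pos ⟨h0.symm, ht⟩]
        ring
      · rw [if_neg ht, if_neg (fun h => ht h.2), PySem.Dict.getD_empty]
        ring
    · rw [if_neg h0, if_neg (fun h => h0 h.1.symm), PySem.Dict.getD_empty]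
      ring

theorem InvB_fold (spectrum : List Int) (mass : Int) (hm : mass = (spectrum.length : Int) - 1) :
    ∀ (n : Nat), n ≤ spectrum.length → ∀ (L : List (PySem.Dict Int Int)), InvB spectrum 0 L →
      InvB spectrum n ((List.range n).foldl (pushLayer spectrum mass) L) := by
  intro n
  induction n with
  | zero => intro _ L h; exact h
  | succ n ih =>
    intro hn L h
    rw [List.range_succ, List.foldl_append, List.foldl_cons, List.foldl_nil]
    have hInvN := ih (by omega) L h
    exact pushLayer_step spectrum mass n _ hm hInvN (by rw [hInvN.1]; omega)

theorem B_eq_map (spectrum : List Int) (min_s max_s : Int) :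
    Size_of_spectral_dictionary_alt spectrum min_s max_s
      = (PySem.List.pyRange min_s (max_s + 1) 1).map
          (fun t => S spectrum ((spectrum.length : Int) - 1) t) := by
  unfold Size_of_spectral_dictionary_alt
  simp only []
  have hto : (((spectrum.length : Int) - 1) + 1).toNat = spectrum.length := by omega
  rw [hto]
  apply List.map_congr_left
  intro t _
  by_cases hlen : spectrum.length = 0
  · rw [if_neg (by omega), S_neg spectrum _ t (Or.inl (by omega)), PySem.Dict.getD_empty]
  · have h0m : (0 : Int) ≤ (spectrum.length : Int) - 1 := by omega
    rw [if_pos h0m, if_pos h0m]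
    have hInv := InvB_fold spectrum ((spectrum.length : Int) - 1) rfl spectrum.length le_rfl
      (((List.range spectrum.length).map (fun _ => (PySem.Dict.empty : PySem.Dict Int Int))).modify 0
        (fun d => d.insert 0 1)) (InvB_zero spectrum)
    have hrd := layer_read spectrum spectrum.length (((spectrum.length : Int) - 1).toNat) _
      hInv (by rw [hInv.1]; omega) (by omega) t
    rw [show ((List.range spectrum.length).foldl (pushLayer spectrum ((spectrum.length : Int) - 1))
          (((List.range spectrum.length).map (fun _ => (PySem.Dict.empty : PySem.Dict Int Int))).modify 0
            (fun d => d.insert 0 1)))[(((spectrum.length : Int) - 1)).toNat]?.getD PySem.Dict.empty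
        = layerD ((List.range spectrum.length).foldl (pushLayer spectrum ((spectrum.length : Int) - 1))
          (((List.range spectrum.length).map (fun _ => (PySem.Dict.empty : PySem.Dict Int Int))).modify 0
            (fun d => d.insert 0 1))) (((spectrum.length : Int) - 1).toNat) from rfl]
    rw [hrd]
    congr 1
    omega

theorem Size_of_spectral_dictionary_spec : Claim_equal_Size_of_spectral_dictionary := by
  intro spectrum min_s max_s _
  unfold Spec_Size_of_spectral_dictionary
  rw [A_eq_map, B_eq_map]
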